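-- pv_equiv track=rewrite | github.com/Megatenogoukui/DSA_Coding | Frequent_Interview_Questions/Featured_products.py | featuredProducts
-- ===== SOURCE A (Python) =====
-- from collections import Counter
--
-- def featuredProducts(arr):
--     # Sorting the Array
--     arr.sort()
--
--     # Storing the items in a dictionary (hash Map)
--     productCount = dict(Counter(arr))
--
--     # Calcutating the max frequency
--     max = 0
--     for i in productCount:
--         if max < productCount[i]:
--             max = productCount[i]
--
--     # Appending the items with max value in the new list
--     featured = []
--     for key ,value in productCount.items():
--         if max == value :
--             featured.append(key)
--
--     # Printing the last name in the list
--     return featured[-1]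
-- ===== SOURCE B (Python) =====
-- from collections import Counter
--
-- def featuredProducts(arr):
--     # Sort in place (same observable mutation as the original)
--     arr.sort()
--     # One pass over the counts: keep the latest (= largest, keys come out
--     # in ascending order) key whose count ties or beats the running best.
--     best_key, best_cnt = None, 0
--     for key, cnt in Counter(arr).items():
--         if cnt >= best_cnt:
--             best_key, best_cnt = key, cnt
--     return best_key
-- ===== Notes on version B (the rewrite author's own statement) =====
-- stated objective: simpler
-- what changed: Replaces A's three passes over the counts (max-frequency scan, filter into a 'featured' list, then take its last element) by a single fold over the Counter items that keeps the latest key whose count ties or beats the running best (keys iterate in ascending order after the sort).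
import Mathlib
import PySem

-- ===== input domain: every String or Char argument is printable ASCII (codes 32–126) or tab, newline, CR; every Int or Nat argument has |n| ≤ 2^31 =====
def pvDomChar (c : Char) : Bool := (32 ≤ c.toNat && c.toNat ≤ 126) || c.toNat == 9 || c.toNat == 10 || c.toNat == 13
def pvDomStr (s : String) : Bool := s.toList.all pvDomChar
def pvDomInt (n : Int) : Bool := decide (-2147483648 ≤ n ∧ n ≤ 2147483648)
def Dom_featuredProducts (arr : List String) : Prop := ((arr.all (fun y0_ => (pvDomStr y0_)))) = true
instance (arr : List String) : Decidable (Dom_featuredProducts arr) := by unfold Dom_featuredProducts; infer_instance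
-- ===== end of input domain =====

-- B replaces A's three passes over the counts (max scan, filter, last element) by one
-- best-so-far fold over the Counter items; objective: simpler. Both Pythons sort arr in
-- place; the equivalence proved here is about the RETURN value (B performs the same sort).

-- ===== PORT A =====
def featuredProducts (arr : List String) : String :=
  let sortedArr := PySem.List.sorted arr (fun x => x) false
  let productCount := PySem.Dict.counter sortedArr
  let mx := productCount.keys.foldl
    (fun m i => if m < productCount.getD i 0 then productCount.getD i 0 else m) (0 : Int)
  let featured := productCount.items.foldl
    (fun acc p => if mx = p.2 then acc ++ [p.1] else acc) ([] : List String)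
  -- featured[-1]: Python raises IndexError when featured is empty (excluded by Pre_)
  (PySem.List.pyGet? featured (-1)).getD ""

-- ===== PORT B =====
def featuredProducts_alt (arr : List String) : String :=
  let sortedArr := PySem.List.sorted arr (fun x => x) false
  let best := (PySem.Dict.counter sortedArr).items.foldl
    (fun s p => if s.2 ≤ p.2 then (some p.1, p.2) else s)
    ((none, 0) : Option String × Int)
  -- Python's B returns None on empty input (excluded by Pre_)
  best.1.getD ""

-- ===== PRECONDITION & SPEC =====
-- Pre_ excludes only the empty list, on which Python A raises IndexError (featured[-1]).
def Pre_featuredProducts (arr : List String) : Prop := arr ≠ []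
instance (arr : List String) : Decidable (Pre_featuredProducts arr) := by unfold Pre_featuredProducts; infer_instance
def pvWitness_featuredProducts : List String := ["a", "b", "a"]
def Spec_featuredProducts (arr : List String) (out : String) : Prop := out = featuredProducts_alt arr
instance (arr : List String) (out : String) : Decidable (Spec_featuredProducts arr out) := by unfold Spec_featuredProducts; infer_instance

-- ===== CLAIM (what is proved, stated in full; the proofs are below) =====
def Claim_equal_featuredProducts : Prop := ∀ (arr : List String), Dom_featuredProducts arr → Pre_featuredProducts arr → Spec_featuredProducts arr (featuredProducts arr)

-- ===== LEMMAS AND PROOFS =====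

-- the max of the values of L, as A's first loop computes it (floor 0)
def pvMaxOf (L : List (String × Int)) : Int :=
  L.foldl (fun m p => if m < p.2 then p.2 else m) 0

lemma pvMaxOf_append (L : List (String × Int)) (p : String × Int) :
    pvMaxOf (L ++ [p]) = if pvMaxOf L < p.2 then p.2 else pvMaxOf L := by
  simp [pvMaxOf, List.foldl_append]

-- core: B's best-so-far fold returns (last key with maximal value, that maximum)
lemma pvBest_eq (L : List (String × Int)) :
    L.foldl (fun s p => if s.2 ≤ p.2 then (some p.1, p.2) else s)
      ((none, 0) : Option String × Int)
    = ((L.foldl (fun acc p => if pvMaxOf L = p.2 then acc ++ [p.1] else acc)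
          ([] : List String)).getLast?, pvMaxOf L) := by
  induction L using List.reverseRecOn with
  | nil => simp [pvMaxOf]
  | append_singleton L p ih =>
    rw [List.foldl_append, ih, pvMaxOf_append]
    by_cases h : pvMaxOf L ≤ p.2
    · have hm : (if pvMaxOf L < p.2 then p.2 else pvMaxOf L) = p.2 := by
        split <;> omega
      simp [hm, List.foldl_append, h]
    · have hlt : p.2 < pvMaxOf L := by omega
      have hm : (if pvMaxOf L < p.2 then p.2 else pvMaxOf L) = pvMaxOf L := by
        split <;> omega
      have hne : ¬ (pvMaxOf L = p.2) := by omega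
      simp [hm, List.foldl_append, h, hne]

-- A's max loop over keys equals the same fold over items (keys of a counter are Nodup)
lemma pvKeysFold_eq (d : PySem.Dict String Int) (hnd : d.keys.Nodup) :
    d.keys.foldl (fun m i => if m < d.getD i 0 then d.getD i 0 else m) (0 : Int)
    = pvMaxOf d.items := by
  have hk : d.keys = d.items.map (·.1) := rfl
  rw [hk, List.foldl_map, pvMaxOf]
  apply PySem.List.foldl_congr_mem
  intro m p hp
  obtain ⟨k, v⟩ := p
  rw [PySem.Dict.getD_of_mem_items d hp hnd]

-- ===== VERDICT (by name: the statement is the Claim_ definition above) =====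
theorem featuredProducts_spec : Claim_equal_featuredProducts := by
  intro arr _ _
  unfold Spec_featuredProducts featuredProducts featuredProducts_alt
  simp only [pvKeysFold_eq _ (PySem.Dict.nodup_keys_counter _), pvBest_eq,
    PySem.List.pyGet?_neg_one]
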